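-- pv_equiv track=rewrite | github.com/anjaeha/CodingTest | 프로그래머스_문제풀이/메뉴리뉴얼.py | solution
-- ===== SOURCE A (Python) =====
-- from itertools import combinations
-- from collections import Counter
--
-- def solution(orders, course):
--     answer = []
--     for c in course:
--         temp = []
--         for order in orders:
--             combi = combinations(sorted(order), c)
--             temp += combi
--         counter = Counter(temp)
--
--         if counter:
--             max_ = max(list(counter.values()))
--             if max_ >= 2:
--                 for key, value in counter.items():
--                     if counter[key] == max_:
--                         answer.append(''.join(key))
--
--     return sorted(answer)
-- ===== SOURCE B (Python) =====
-- def _ways(s, k):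
--     """Number of index-subsequences of list s equal to tuple k (counting DP, no enumeration)."""
--     if not k:
--         return 1
--     if not s:
--         return 0
--     n = _ways(s[1:], k)
--     if s[0] == k[0]:
--         n += _ways(s[1:], k[1:])
--     return n
--
--
-- def _subs(s, c):
--     """Distinct sorted c-element sub-multisets of the sorted list s, as tuples,
--     peeling one block of equal leading characters per call."""
--     if c == 0:
--         return [()]
--     if not s:
--         return []
--     ch = s[0]
--     block = 0
--     while block < len(s) and s[block] == ch:
--         block += 1
--     rest = s[block:]
--     out = []
--     for take in range(min(block, c) + 1):
--         for tail in _subs(rest, c - take):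
--             out.append((ch,) * take + tail)
--     return out
--
--
-- def solution(orders, course):
--     sorted_orders = [sorted(order) for order in orders]
--     answer = []
--     for c in course:
--         cands = list(dict.fromkeys(k for s in sorted_orders for k in _subs(s, c)))
--         if not cands:
--             continue
--         counts = [sum(_ways(s, k) for s in sorted_orders) for k in cands]
--         best = max(counts)
--         if best >= 2:
--             for k, v in zip(cands, counts):
--                 if v == best:
--                     answer.append(''.join(k))
--     return sorted(answer)
-- ===== Notes on version B (the rewrite author's own statement) =====
-- stated objective: alternative
-- what changed: B never builds a Counter of enumerated combination tuples: it generates each distinct candidate sub-multiset once by a run-peeling recursion over the sorted order, and counts each candidate arithmetically with a subsequence-counting recursion, instead of A's per-course enumeration of every combination of every order into a Counter.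
import Mathlib
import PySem

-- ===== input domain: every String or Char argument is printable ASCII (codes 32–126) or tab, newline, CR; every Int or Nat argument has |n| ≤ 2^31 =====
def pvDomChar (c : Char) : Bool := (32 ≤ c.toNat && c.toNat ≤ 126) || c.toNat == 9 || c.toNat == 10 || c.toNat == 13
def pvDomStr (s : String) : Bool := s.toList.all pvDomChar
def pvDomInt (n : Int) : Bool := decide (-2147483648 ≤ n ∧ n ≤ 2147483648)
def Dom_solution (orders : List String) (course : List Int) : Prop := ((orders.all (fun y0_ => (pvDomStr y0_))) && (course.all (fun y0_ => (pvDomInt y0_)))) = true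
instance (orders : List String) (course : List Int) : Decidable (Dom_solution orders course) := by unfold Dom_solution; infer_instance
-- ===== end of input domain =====

-- B drops A's Counter of enumerated combination tuples: it generates each distinct candidate
-- sub-multiset once (run-peeling recursion over the sorted order) and counts each candidate by a
-- subsequence-counting recursion — an alternative algorithm of similar cost, not claimed faster.

-- ===== PORT A =====
def solution (orders : List String) (course : List Int) : List String :=
  let answer := course.foldl (fun answer c =>
    let temp := orders.foldl (fun temp order =>
      temp ++ PySem.List.combinations (PySem.List.sorted order.toList (fun x => x) false) c.toNat) []
    let counter := PySem.Dict.counter temp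
    if counter.items = [] then answer
    else
      match PySem.List.max? counter.values (fun v => v) with
      | none => answer
      | some m =>
        if 2 ≤ m then
          counter.items.foldl (fun answer kv =>
            if counter.getD kv.1 0 = m then answer ++ [String.ofList kv.1] else answer) answer
        else answer) []
  PySem.List.sorted answer (fun s => s) false

-- ===== PORT B =====
-- _ways(s, k): number of index-subsequences of s equal to k (Python checks k first, then s)
def waysB : List Char → List Char → Int
  | _, [] => 1
  | [], _ :: _ => 0
  | sh :: st, kh :: kt =>
    let n := waysB st (kh :: kt)
    if sh = kh then n + waysB st kt else n

-- _subs(s, c): the while loop counting the leading equal block is exactly the length of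
-- takeWhile (== s[0]); '(ch,)*take + tail' is List.replicate take.toNat ch ++ tail.
-- The fuel argument (started at s.length, always sufficient because each call drops a nonempty
-- leading block) only makes the recursion structural; it never alters the computation.
def subsBGo : Nat → List Char → Int → List (List Char)
  | fuel, s, c =>
    if c = 0 then [[]]
    else
      match fuel, s with
      | _, [] => []
      | 0, _ :: _ => []
      | fuel + 1, ch :: tl =>
        let block := ((ch :: tl).takeWhile (fun x => x == ch)).length
        let rest := (ch :: tl).drop block
        (PySem.List.pyRange 0 (min (block : Int) c + 1) 1).foldl
          (fun out take =>
            (subsBGo fuel rest (c - take)).foldl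
              (fun out tail => out ++ [List.replicate take.toNat ch ++ tail]) out) []

def subsB (s : List Char) (c : Int) : List (List Char) := subsBGo s.length s c

def solution_alt (orders : List String) (course : List Int) : List String :=
  let sortedOrders := orders.map (fun o => PySem.List.sorted o.toList (fun x => x) false)
  let answer := course.foldl (fun answer c =>
    let cands := PySem.List.dedup (sortedOrders.flatMap (fun s => subsB s c))
    if cands = [] then answer
    else
      let counts := cands.map (fun k => (sortedOrders.map (fun s => waysB s k)).sum)
      match PySem.List.max? counts (fun v => v) with
      | none => answer
      | some best =>
        if 2 ≤ best then
          (cands.zip counts).foldl (fun answer kv =>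
            if kv.2 = best then answer ++ [String.ofList kv.1] else answer) answer
        else answer) []
  PySem.List.sorted answer (fun s => s) false

-- ===== PRECONDITION & SPEC =====
-- Pre_ excludes exactly the inputs where the Python A raises: with a nonempty orders list,
-- a negative course size makes combinations(sorted(order), c) raise ValueError.
def Pre_solution (orders : List String) (course : List Int) : Prop :=
  orders = [] ∨ ∀ c ∈ course, 0 ≤ c
instance (orders : List String) (course : List Int) : Decidable (Pre_solution orders course) := by
  unfold Pre_solution; infer_instance

def pvWitness_solution : List String × List Int := (["abc", "ab"], [2])

def Spec_solution (orders : List String) (course : List Int) (out : List String) : Prop := out = solution_alt orders course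
instance (orders : List String) (course : List Int) (out : List String) : Decidable (Spec_solution orders course out) := by unfold Spec_solution; infer_instance

-- ===== CLAIM (what is proved, stated in full; the proofs are below) =====
def Claim_equal_solution : Prop := ∀ (orders : List String) (course : List Int), Dom_solution orders course → Pre_solution orders course → Spec_solution orders course (solution orders course)

-- ===== LEMMAS AND PROOFS =====

-- ---- facts about B's counting recursion ----

-- the count of key k among the |k|-combinations of s is the subsequence-counting recursion
lemma waysB_eq_count (s k : List Char) :
    waysB s k = ((PySem.List.combinations s k.length).count k : Int) := by
  induction s generalizing k with
  | nil =>
    cases k with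
    | nil => simp [waysB, PySem.List.combinations_zero]
    | cons kh kt => simp [waysB, PySem.List.combinations_nil_succ]
  | cons sh st ih =>
    cases k with
    | nil => simp [waysB, PySem.List.combinations_zero]
    | cons kh kt =>
      simp only [waysB, List.length_cons, PySem.List.combinations_cons_succ,
        List.count_append]
      have h2 := ih (kh :: kt)
      by_cases h : sh = kh
      · subst h
        have h1 : ((PySem.List.combinations st kt.length).map (sh :: ·)).count (sh :: kt)
            = (PySem.List.combinations st kt.length).count kt :=
          List.count_map_of_injective _ _ (fun a b hab => by injection hab) _
        have h3 := ih kt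
        simp only [h1, List.length_cons] at *
        push_cast
        omega
      · have h1 : ((PySem.List.combinations st kt.length).map (sh :: ·)).count (kh :: kt) = 0 := by
          rw [List.count_eq_zero]
          intro hmem
          rcases List.mem_map.mp hmem with ⟨a, _, ha⟩
          exact h (by injection ha)
        simp only [if_neg h, h1, List.length_cons] at *
        push_cast
        omega

-- ---- facts about B's candidate generation ----

lemma drop_length_takeWhile (p : Char → Bool) (l : List Char) :
    l.drop (l.takeWhile p).length = l.dropWhile p := by
  induction l with
  | nil => rfl
  | cons x xs ih => by_cases h : p x <;> simp [h, ih]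

lemma mem_subsBGo (fuel : Nat) (s : List Char) (hf : s.length ≤ fuel)
    (hs : s.Pairwise (· ≤ ·)) (c : Int) (hc : 0 ≤ c) (k : List Char) :
    k ∈ subsBGo fuel s c ↔ k.Sublist s ∧ (k.length : Int) = c := by
  induction fuel generalizing s c k with
  | zero =>
    have hsnil : s = [] := by cases s <;> simp_all
    subst hsnil
    by_cases h0 : c = 0
    · subst h0
      constructor
      · intro hk
        have hknil : k = [] := by simpa [subsBGo] using hk
        subst hknil; exact ⟨List.Sublist.refl _, rfl⟩
      · rintro ⟨hsub, _⟩
        have hknil : k = [] := List.sublist_nil.mp hsub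
        subst hknil; simp [subsBGo]
    · constructor
      · intro hk; simp [subsBGo, h0] at hk
      · rintro ⟨hsub, hlen⟩
        have hknil : k = [] := List.sublist_nil.mp hsub
        subst hknil
        exact absurd (show c = 0 by exact_mod_cast hlen.symm) h0
  | succ fuel ih =>
    by_cases h0 : c = 0
    · subst h0
      constructor
      · intro hk
        have hknil : k = [] := by
          cases s with
          | nil => simpa [subsBGo] using hk
          | cons a b => simpa [subsBGo] using hk
        subst hknil; exact ⟨List.nil_sublist _, rfl⟩
      · rintro ⟨_, hlen⟩
        have hknil : k = [] := by
          cases k with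
          | nil => rfl
          | cons a b => exfalso; simp only [List.length_cons] at hlen; omega
        subst hknil
        cases s with
        | nil => simp [subsBGo]
        | cons a b => simp [subsBGo]
    · cases s with
      | nil =>
        constructor
        · intro hk; simp [subsBGo, h0] at hk
        · rintro ⟨hsub, hlen⟩
          have hknil : k = [] := List.sublist_nil.mp hsub
          subst hknil
          exact absurd (show c = 0 by exact_mod_cast hlen.symm) h0
      | cons ch tl =>
        set P : Char → Bool := fun x => x == ch with hP
        set block : Nat := ((ch :: tl).takeWhile P).length with hblock
        set rest : List Char := (ch :: tl).drop block with hrest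
        have h_tw : (ch :: tl).takeWhile P = List.replicate block ch := by
          rw [List.eq_replicate_iff]
          refine ⟨rfl, fun b hb => ?_⟩
          have hb' := List.mem_takeWhile_imp (p := P) hb
          rw [hP] at hb'
          exact eq_of_beq hb'
        have h_rest_eq : rest = (ch :: tl).dropWhile P := by
          rw [hrest, hblock, drop_length_takeWhile]
        have h_split : ch :: tl = List.replicate block ch ++ rest := by
          conv_lhs => rw [← List.takeWhile_append_dropWhile (p := P) (l := ch :: tl)]
          rw [h_tw, h_rest_eq]
        have h_block_pos : 1 ≤ block := by
          rw [hblock, List.takeWhile_cons]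
          simp [hP]
        have h_len : (ch :: tl).length = block + rest.length := by
          conv_lhs => rw [h_split]
          rw [List.length_append, List.length_replicate]
        have h_rest_fuel : rest.length ≤ fuel := by
          have h' := hf; rw [h_len] at h'; omega
        have h_pair := hs
        rw [h_split, List.pairwise_append] at h_pair
        obtain ⟨hp1, hp2, hcross⟩ := h_pair
        have h_rest_pair : rest.Pairwise (· ≤ ·) := by
          rw [h_rest_eq]
          exact hs.sublist (List.dropWhile_sublist P)
        have hunfold : subsBGo (fuel + 1) (ch :: tl) c
            = (PySem.List.pyRange 0 (min (block : Int) c + 1) 1).foldl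
                (fun out take =>
                  (subsBGo fuel rest (c - take)).foldl
                    (fun out tail => out ++ [List.replicate take.toNat ch ++ tail]) out) [] := by
          conv_lhs => rw [subsBGo]
          rw [if_neg h0]
        have hfold : subsBGo (fuel + 1) (ch :: tl) c
            = (PySem.List.pyRange 0 (min (block : Int) c + 1) 1).flatMap
                (fun take => (subsBGo fuel rest (c - take)).map
                  (fun tail => List.replicate take.toNat ch ++ tail)) := by
          have h1 := PySem.List.foldl_congr_mem'
            (PySem.List.pyRange 0 (min (block : Int) c + 1) 1)
            (fun out take =>
              (subsBGo fuel rest (c - take)).foldl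
                (fun out tail => out ++ [List.replicate take.toNat ch ++ tail]) out)
            (fun out take => out ++ (subsBGo fuel rest (c - take)).map
              (fun tail => List.replicate take.toNat ch ++ tail))
            []
            (fun take _ out => PySem.List.foldl_append_singleton_eq_map _ _ _)
          rw [hunfold, h1, PySem.List.foldl_append_eq_flatMap, List.nil_append]
        rw [hfold]
        simp only [List.mem_flatMap, List.mem_map]
        constructor
        · rintro ⟨take, htr, tail, htail, rfl⟩
          have hrange := (PySem.List.mem_pyRange_one).mp htr
          have h_take_le : take ≤ min (block : Int) c := by omega
          have hidh := (ih rest h_rest_fuel h_rest_pair (c - take) (by omega) tail).mp htail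
          constructor
          · conv_rhs => rw [h_split]
            exact List.Sublist.append
              ((List.replicate_sublist_replicate ch).mpr (by omega))
              hidh.1
          · rw [List.length_append, List.length_replicate]
            have := hidh.2
            push_cast
            omega
        · rintro ⟨hsub, hlen⟩
          rw [h_split] at hsub
          rcases List.sublist_append_iff.mp hsub with ⟨u, v, rfl, hu, hv⟩
          rcases List.sublist_replicate_iff.mp hu with ⟨t, ht, rfl⟩
          rw [List.length_append, List.length_replicate] at hlen
          have htc : (t : Int) ≤ c := by push_cast at hlen; omega
          refine ⟨(t : Int), ?_, v, ?_, ?_⟩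
          · exact (PySem.List.mem_pyRange_one).mpr (by omega)
          · refine (ih rest h_rest_fuel h_rest_pair (c - t) (by omega) v).mpr
              ⟨hv, by push_cast at hlen ⊢; omega⟩
          · simp

lemma mem_subsB (s : List Char) (hs : s.Pairwise (· ≤ ·)) (c : Int) (hc : 0 ≤ c) (k : List Char) :
    k ∈ subsB s c ↔ k.Sublist s ∧ (k.length : Int) = c :=
  mem_subsBGo s.length s le_rfl hs c hc k

-- ---- shared shape of both per-course-entry bodies ----

def tempOf (orders : List String) (c : Int) : List (List Char) :=
  orders.flatMap (fun o => PySem.List.combinations (PySem.List.sorted o.toList (fun x => x) false) c.toNat)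

def cntA (orders : List String) (c : Int) (k : List Char) : Int := ((tempOf orders c).count k : Int)

def cntB (orders : List String) (k : List Char) : Int :=
  ((orders.map (fun o => PySem.List.sorted o.toList (fun x => x) false)).map (fun s => waysB s k)).sum

def keysA (orders : List String) (c : Int) : List (List Char) := PySem.Set.ofList (tempOf orders c)

def keysB (orders : List String) (c : Int) : List (List Char) :=
  PySem.List.dedup ((orders.map (fun o => PySem.List.sorted o.toList (fun x => x) false)).flatMap (fun s => subsB s c))

def pick (keys : List (List Char)) (cnt : List Char → Int) : List String :=
  if keys = [] then []
  else
    match PySem.List.max? (keys.map cnt) (fun v => v) with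
    | none => []
    | some m =>
      if 2 ≤ m then (keys.filter (fun k => decide (cnt k = m))).map (fun k => String.ofList k)
      else []

lemma stepA_eq (orders : List String) (c : Int) (ans : List String) :
    (if (PySem.Dict.counter (orders.foldl (fun temp order =>
          temp ++ PySem.List.combinations (PySem.List.sorted order.toList (fun x => x) false) c.toNat) [])).items = [] then ans
     else
       match PySem.List.max? (PySem.Dict.counter (orders.foldl (fun temp order =>
          temp ++ PySem.List.combinations (PySem.List.sorted order.toList (fun x => x) false) c.toNat) [])).values (fun v => v) with
       | none => ans
       | some m =>
         if 2 ≤ m then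
           (PySem.Dict.counter (orders.foldl (fun temp order =>
              temp ++ PySem.List.combinations (PySem.List.sorted order.toList (fun x => x) false) c.toNat) [])).items.foldl
             (fun answer kv =>
               if (PySem.Dict.counter (orders.foldl (fun temp order =>
                  temp ++ PySem.List.combinations (PySem.List.sorted order.toList (fun x => x) false) c.toNat) [])).getD kv.1 0 = m
               then answer ++ [String.ofList kv.1] else answer) ans
         else ans)
    = ans ++ pick (keysA orders c) (cntA orders c) := by
  have htemp : orders.foldl (fun temp order =>
      temp ++ PySem.List.combinations (PySem.List.sorted order.toList (fun x => x) false) c.toNat) []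
      = tempOf orders c := by
    rw [PySem.List.foldl_append_eq_flatMap, List.nil_append]; rfl
  simp only [htemp]
  have hitems : (PySem.Dict.counter (tempOf orders c)).items
      = (keysA orders c).map (fun k => (k, cntA orders c k)) := PySem.Dict.items_counter _
  have hvalues : (PySem.Dict.counter (tempOf orders c)).values
      = (keysA orders c).map (cntA orders c) := by
    simp only [PySem.Dict.values, hitems, List.map_map]
    rfl
  rw [hitems, hvalues]
  unfold pick
  by_cases hk : keysA orders c = []
  · rw [if_pos (by simp [hk]), if_pos hk]
    exact (List.append_nil ans).symm
  · rw [if_neg (by simpa [List.map_eq_nil_iff] using hk), if_neg hk]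
    cases hm : PySem.List.max? ((keysA orders c).map (cntA orders c)) (fun v => v) with
    | none => exact (List.append_nil ans).symm
    | some m =>
      dsimp only
      by_cases h2 : 2 ≤ m
      · rw [if_pos h2, if_pos h2]
        rw [PySem.List.foldl_append_ite
          (p := fun kv : List Char × Int => (PySem.Dict.counter (tempOf orders c)).getD kv.1 0 = m)
          (f := fun kv : List Char × Int => String.ofList kv.1)]
        congr 1
        rw [List.filter_map, List.map_map]
        have hfc : ((fun kv : List Char × Int =>
              decide ((PySem.Dict.counter (tempOf orders c)).getD kv.1 0 = m))
              ∘ (fun k => (k, cntA orders c k)))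
            = fun k => decide (cntA orders c k = m) := by
          funext k
          simp [PySem.Dict.getD_counter]
          rfl
        rw [hfc]
        rfl
      · rw [if_neg h2, if_neg h2]
        exact (List.append_nil ans).symm

lemma stepB_eq (orders : List String) (c : Int) (ans : List String) :
    (if keysB orders c = [] then ans
     else
       match PySem.List.max? ((keysB orders c).map (cntB orders)) (fun v => v) with
       | none => ans
       | some best =>
         if 2 ≤ best then
           ((keysB orders c).zip ((keysB orders c).map (cntB orders))).foldl
             (fun answer kv =>
               if kv.2 = best then answer ++ [String.ofList kv.1] else answer) ans
         else ans)
    = ans ++ pick (keysB orders c) (cntB orders) := by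
  have hzip : ∀ l : List (List Char),
      l.zip (l.map (cntB orders)) = l.map (fun k => (k, cntB orders k)) := by
    intro l
    induction l with
    | nil => rfl
    | cons a t ih => simp [ih]
  unfold pick
  by_cases hk : keysB orders c = []
  · rw [if_pos hk, if_pos hk]
    exact (List.append_nil ans).symm
  · rw [if_neg hk, if_neg hk]
    cases hm : PySem.List.max? ((keysB orders c).map (cntB orders)) (fun v => v) with
    | none => exact (List.append_nil ans).symm
    | some m =>
      dsimp only
      by_cases h2 : 2 ≤ m
      · rw [if_pos h2, if_pos h2, hzip (keysB orders c)]
        rw [PySem.List.foldl_append_ite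
          (p := fun kv : List Char × Int => kv.2 = m)
          (f := fun kv : List Char × Int => String.ofList kv.1)]
        congr 1
        rw [List.filter_map, List.map_map]
        rfl
      · rw [if_neg h2, if_neg h2]
        exact (List.append_nil ans).symm

-- ---- permutation machinery ----

lemma max?_id_perm (l1 l2 : List Int) (h : l1.Perm l2) :
    PySem.List.max? l1 (fun v => v) = PySem.List.max? l2 (fun v => v) := by
  cases e1 : PySem.List.max? l1 (fun v => v) with
  | none =>
    have hn1 : l1 = [] := (PySem.List.max?_eq_none_iff _ _).mp e1
    subst hn1
    have hn2 : l2 = [] := h.nil_eq.symm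
    subst hn2
    rfl
  | some m1 =>
    cases e2 : PySem.List.max? l2 (fun v => v) with
    | none =>
      have hn2 : l2 = [] := (PySem.List.max?_eq_none_iff _ _).mp e2
      subst hn2
      have hn1 : l1 = [] := h.eq_nil
      subst hn1
      rw [(PySem.List.max?_eq_none_iff ([] : List Int) (fun v => v)).mpr rfl] at e1
      simp at e1
    | some m2 =>
      have hm1 : m1 ≤ m2 := PySem.List.max?_isMax e2 m1 (h.mem_iff.mp (PySem.List.max?_mem e1))
      have hm2 : m2 ≤ m1 := PySem.List.max?_isMax e1 m2 (h.symm.mem_iff.mp (PySem.List.max?_mem e2))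
      rw [le_antisymm hm1 hm2]

lemma pick_perm {keys1 keys2 : List (List Char)} {cnt1 cnt2 : List Char → Int}
    (hperm : keys1.Perm keys2) (hcnt : ∀ k ∈ keys1, cnt1 k = cnt2 k) :
    (pick keys1 cnt1).Perm (pick keys2 cnt2) := by
  have hmap : keys1.map cnt1 = keys1.map cnt2 := List.map_congr_left hcnt
  by_cases h1 : keys1 = []
  · subst h1
    have h2 : keys2 = [] := hperm.nil_eq.symm
    subst h2
    exact List.Perm.refl _
  · have h2 : keys2 ≠ [] := fun h => h1 (by subst h; exact hperm.eq_nil)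
    unfold pick
    rw [if_neg h1, if_neg h2]
    have hm : PySem.List.max? (keys1.map cnt1) (fun v => v)
        = PySem.List.max? (keys2.map cnt2) (fun v => v) := by
      apply max?_id_perm
      rw [hmap]
      exact hperm.map cnt2
    rw [hm]
    cases PySem.List.max? (keys2.map cnt2) (fun v => v) with
    | none => exact List.Perm.refl _
    | some m =>
      dsimp only
      by_cases hge : 2 ≤ m
      · rw [if_pos hge, if_pos hge]
        apply List.Perm.map
        rw [List.filter_congr (fun k hk => by rw [hcnt k hk])]
        exact hperm.filter _
      · rw [if_neg hge, if_neg hge]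

lemma mem_keysA (orders : List String) (c : Int) (k : List Char) :
    k ∈ keysA orders c ↔ ∃ o ∈ orders,
      k.Sublist (PySem.List.sorted o.toList (fun x => x) false) ∧ k.length = c.toNat := by
  unfold keysA tempOf
  rw [PySem.Set.mem_ofList, List.mem_flatMap]
  constructor
  · rintro ⟨o, ho, hk⟩
    have h := (PySem.List.mem_combinations_iff _ _ _).mp hk
    exact ⟨o, ho, h.1, h.2⟩
  · rintro ⟨o, ho, h1, h2⟩
    exact ⟨o, ho, (PySem.List.mem_combinations_iff _ _ _).mpr ⟨h1, h2⟩⟩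

lemma sorted_chars_pairwise (o : String) :
    (PySem.List.sorted o.toList (fun x => x) false).Pairwise (· ≤ ·) := by
  have h := PySem.List.sorted_pairwise (xs := o.toList) (key := fun x => x)
  simpa using h

lemma keys_perm (orders : List String) (c : Int) (hc : 0 ≤ c) :
    (keysA orders c).Perm (keysB orders c) := by
  unfold keysB
  rw [PySem.List.dedup_eq_ofList]
  apply (List.perm_ext_iff_of_nodup (by unfold keysA; exact PySem.Set.nodup_ofList _)
    (PySem.Set.nodup_ofList _)).mpr
  intro k
  rw [mem_keysA, PySem.Set.mem_ofList, List.mem_flatMap]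
  constructor
  · rintro ⟨o, ho, h1, h2⟩
    refine ⟨PySem.List.sorted o.toList (fun x => x) false, List.mem_map.mpr ⟨o, ho, rfl⟩, ?_⟩
    refine (mem_subsB _ (sorted_chars_pairwise o) c hc k).mpr ⟨h1, ?_⟩
    rw [h2]
    exact_mod_cast Int.toNat_of_nonneg hc
  · rintro ⟨s, hsmem, hk⟩
    rcases List.mem_map.mp hsmem with ⟨o, ho, rfl⟩
    have h := (mem_subsB _ (sorted_chars_pairwise o) c hc k).mp hk
    exact ⟨o, ho, h.1, by omega⟩

lemma cnt_eq (orders : List String) (c : Int) (k : List Char)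
    (hk : k ∈ keysA orders c) : cntA orders c k = cntB orders k := by
  have hklen : k.length = c.toNat := by
    rcases (mem_keysA orders c k).mp hk with ⟨o, _, _, h⟩
    exact h
  unfold cntA cntB tempOf
  rw [List.count_flatMap, List.map_map]
  rw [Nat.cast_list_sum, List.map_map]
  congr 1
  apply List.map_congr_left
  intro o _
  simp only [Function.comp]
  rw [waysB_eq_count, hklen]

lemma flatMap_perm_congr (l : List Int) (f g : Int → List String)
    (h : ∀ c ∈ l, (f c).Perm (g c)) : (l.flatMap f).Perm (l.flatMap g) := by
  induction l with
  | nil => exact List.Perm.refl _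
  | cons a t ih =>
    simp only [List.flatMap_cons]
    exact (h a (List.mem_cons_self)).append (ih (fun c hc => h c (List.mem_cons_of_mem a hc)))

lemma contrib_perm (orders : List String) (c : Int) (hpre : orders = [] ∨ 0 ≤ c) :
    (pick (keysA orders c) (cntA orders c)).Perm (pick (keysB orders c) (cntB orders)) := by
  rcases hpre with h | h
  · subst h
    simp [keysA, keysB, tempOf, pick]
  · exact pick_perm (keys_perm orders c h) (cnt_eq orders c)

lemma solution_unfold (orders : List String) (course : List Int) :
    solution orders course
      = PySem.List.sorted (course.flatMap (fun c => pick (keysA orders c) (cntA orders c)))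
          (fun s => s) false := by
  unfold solution
  dsimp only
  congr 1
  exact (PySem.List.foldl_congr_mem' course _
      (fun ans c => ans ++ pick (keysA orders c) (cntA orders c)) []
      (fun c _ ans => stepA_eq orders c ans)).trans
    (by rw [PySem.List.foldl_append_eq_flatMap, List.nil_append])

lemma solution_alt_unfold (orders : List String) (course : List Int) :
    solution_alt orders course
      = PySem.List.sorted (course.flatMap (fun c => pick (keysB orders c) (cntB orders)))
          (fun s => s) false := by
  unfold solution_alt
  dsimp only
  congr 1
  exact (PySem.List.foldl_congr_mem' course _
      (fun ans c => ans ++ pick (keysB orders c) (cntB orders)) []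
      (fun c _ ans => stepB_eq orders c ans)).trans
    (by rw [PySem.List.foldl_append_eq_flatMap, List.nil_append])

-- ===== VERDICT (by name: the statement is the Claim_ definition above) =====
theorem solution_spec : Claim_equal_solution := by
  intro orders course _ hpre
  unfold Spec_solution
  rw [solution_unfold, solution_alt_unfold]
  apply (PySem.List.sorted_id_eq_sorted_id_iff_perm _ _).mpr
  apply flatMap_perm_congr
  intro c hc
  apply contrib_perm
  rcases hpre with h | h
  · exact Or.inl h
  · exact Or.inr (h c hc)
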